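-- pv_equiv track=rewrite | github.com/mqzpt/koalatype | main.py | _build_rendered_text
-- ===== SOURCE A (Python) =====
-- def _build_rendered_text(
--     prompt_words: list[str], typed_words: list[list[str]]
-- ) -> tuple[str, list[int]]:
--     rendered_words: list[str] = []
--     starts: list[int] = []
--     index = 0
--     for w_idx, word in enumerate(prompt_words):
--         starts.append(index)
--         typed_word = typed_words[w_idx] if w_idx < len(typed_words) else []
--         extra_len = max(len(typed_word) - len(word), 0)
--         rendered_word = word + (" " * extra_len)
--         rendered_words.append(rendered_word)
--         index += len(rendered_word) + 1
--     return " ".join(rendered_words), starts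
-- ===== SOURCE B (Python) =====
-- def _build_rendered_text(
--     prompt_words: list[str], typed_words: list[list[str]]
-- ) -> tuple[str, list[int]]:
--     # Canvas algorithm: compute each cell's width, derive starts as exclusive
--     # prefix sums, then blit the words into a pre-allocated space canvas.
--     n = len(prompt_words)
--     widths = [
--         max(len(w), len(typed_words[i]) if i < len(typed_words) else 0)
--         for i, w in enumerate(prompt_words)
--     ]
--     total = sum(widths) + n - 1 if n else 0
--     starts: list[int] = []
--     pos = 0
--     for wd in widths:
--         starts.append(pos)
--         pos += wd + 1
--     canvas = [" "] * total
--     for s, w in zip(starts, prompt_words):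
--         canvas[s:s + len(w)] = w
--     return "".join(canvas), starts
-- ===== Notes on version B (the rewrite author's own statement) =====
-- stated objective: alternative
-- what changed: Instead of rendering padded words and joining them, B computes only the cell widths, derives starts as exclusive prefix sums of widths, pre-allocates a space-filled canvas of the exact total length and blits each word into it at its start offset; no per-word padding or string join of words is performed.
import Mathlib
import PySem

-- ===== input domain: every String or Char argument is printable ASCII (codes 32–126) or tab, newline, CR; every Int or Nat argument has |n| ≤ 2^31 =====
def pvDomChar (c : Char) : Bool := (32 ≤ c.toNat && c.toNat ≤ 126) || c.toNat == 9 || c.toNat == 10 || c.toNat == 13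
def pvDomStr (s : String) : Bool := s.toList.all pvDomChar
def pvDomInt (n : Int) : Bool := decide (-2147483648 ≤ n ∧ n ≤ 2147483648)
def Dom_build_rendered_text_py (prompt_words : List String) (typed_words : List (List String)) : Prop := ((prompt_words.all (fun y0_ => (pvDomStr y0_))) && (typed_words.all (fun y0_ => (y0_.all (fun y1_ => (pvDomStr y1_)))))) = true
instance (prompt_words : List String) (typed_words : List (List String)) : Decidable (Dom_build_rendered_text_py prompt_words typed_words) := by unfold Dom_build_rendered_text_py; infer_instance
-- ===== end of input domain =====

-- B uses a canvas algorithm: it computes the cell widths, derives the starts as prefix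
-- sums, allocates a space-filled canvas of the exact total length and blits each word
-- into it, instead of A's per-word padding followed by a join.

-- ===== PORT A =====
-- A's loop state: (rendered_words, (starts, index)); one fold over enumerate(prompt_words).
def build_rendered_text_py (prompt_words : List String) (typed_words : List (List String)) : String × List Int :=
  let r := (PySem.List.enumerate prompt_words).foldl
    (fun (acc : List String × List Int × Int) (p : Int × String) =>
      let starts' := acc.2.1 ++ [acc.2.2]
      let typed_word := if p.1 < (typed_words.length : Int) then PySem.List.pyGetD typed_words p.1 [] else []
      let extra_len := max ((typed_word.length : Int) - PySem.Str.len p.2) 0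
      let rendered_word := p.2 ++ String.ofList (List.replicate extra_len.toNat ' ')
      (acc.1 ++ [rendered_word], starts', acc.2.2 + PySem.Str.len rendered_word + 1))
    ([], [], 0)
  (PySem.Str.join " " r.1, r.2.1)

-- ===== PORT B =====
-- width of cell p in B's comprehension: max(len(word), len(typed_words[i]) if i < len(typed_words) else 0)
def pvWidth (typed_words : List (List String)) (p : Int × String) : Int :=
  max (PySem.Str.len p.2)
      (if p.1 < (typed_words.length : Int) then ((PySem.List.pyGetD typed_words p.1 []).length : Int) else 0)

def build_rendered_text_py_alt (prompt_words : List String) (typed_words : List (List String)) : String × List Int :=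
  let n : Int := (prompt_words.length : Int)
  let widths := (PySem.List.enumerate prompt_words).map (pvWidth typed_words)
  let total : Int := if prompt_words ≠ [] then widths.sum + n - 1 else 0
  let starts := (widths.foldl
    (fun (acc : List Int × Int) (wd : Int) => (acc.1 ++ [acc.2], acc.2 + wd + 1)) ([], 0)).1
  let canvas : List Char := List.replicate total.toNat ' '
  -- canvas[s:s+len(w)] = w (equal-length slice assignment, 0 ≤ s) = take s ++ chars of w ++ drop (s+len w); exact here
  let blitted := (starts.zip prompt_words).foldl
    (fun (c : List Char) (p : Int × String) =>
      c.take p.1.toNat ++ p.2.toList ++ c.drop (p.1.toNat + p.2.toList.length)) canvas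
  (String.ofList blitted, starts)

-- ===== PRECONDITION & SPEC =====
def Spec_build_rendered_text_py (prompt_words : List String) (typed_words : List (List String)) (out : String × List Int) : Prop := out = build_rendered_text_py_alt prompt_words typed_words
instance (prompt_words : List String) (typed_words : List (List String)) (out : String × List Int) : Decidable (Spec_build_rendered_text_py prompt_words typed_words out) := by unfold Spec_build_rendered_text_py; infer_instance

-- ===== CLAIM =====
def Claim_equal_build_rendered_text_py : Prop := ∀ (prompt_words : List String) (typed_words : List (List String)), Dom_build_rendered_text_py prompt_words typed_words → Spec_build_rendered_text_py prompt_words typed_words (build_rendered_text_py prompt_words typed_words)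

-- ===== LEMMAS AND PROOFS =====

-- extra trailing spaces (a Nat) of cell p, as A computes them
def pvExtra (typed_words : List (List String)) (p : Int × String) : Nat :=
  (max (((if p.1 < (typed_words.length : Int) then PySem.List.pyGetD typed_words p.1 [] else []).length : Int) - PySem.Str.len p.2) 0).toNat

-- A's rendered word of cell p
def pvPad (typed_words : List (List String)) (p : Int × String) : String :=
  p.2 ++ String.ofList (List.replicate (pvExtra typed_words p) ' ')

-- abstract cell: (characters of the word, extra trailing spaces)
def pvCell (typed_words : List (List String)) (p : Int × String) : List Char × Nat :=
  (p.2.toList, pvExtra typed_words p)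

-- the text the cells denote: words padded by their extras, separated by single spaces
def pvModel : List (List Char × Nat) → List Char
  | [] => []
  | (w, e) :: rest => w ++ List.replicate e ' ' ++ (if rest.isEmpty then [] else ' ' :: pvModel rest)

-- exclusive prefix sums of the cell widths + 1, from a given offset
def pvStarts (off : Nat) : List (List Char × Nat) → List Nat
  | [] => []
  | (w, e) :: rest => off :: pvStarts (off + w.length + e + 1) rest

theorem pv_len_pad (typed_words : List (List String)) (p : Int × String) :
    PySem.Str.len (pvPad typed_words p) = ((p.2.toList.length + pvExtra typed_words p : Nat) : Int) := by
  simp [pvPad, PySem.Str.len_eq]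

theorem pv_width_eq (typed_words : List (List String)) (p : Int × String) :
    pvWidth typed_words p = ((p.2.toList.length + pvExtra typed_words p : Nat) : Int) := by
  unfold pvWidth pvExtra
  rw [PySem.Str.len_eq]
  by_cases h : p.1 < (typed_words.length : Int)
  · simp [h]
    omega
  · simp [h]

-- A's fused fold = the list of padded words, paired with the start/offset fold over that list.
theorem pv_fused (typed_words : List (List String)) (l : List (Int × String))
    (rw : List String) (s : List Int × Int) :
    l.foldl
      (fun (acc : List String × List Int × Int) (p : Int × String) =>
        let starts' := acc.2.1 ++ [acc.2.2]
        let typed_word := if p.1 < (typed_words.length : Int) then PySem.List.pyGetD typed_words p.1 [] else []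
        let extra_len := max ((typed_word.length : Int) - PySem.Str.len p.2) 0
        let rendered_word := p.2 ++ String.ofList (List.replicate extra_len.toNat ' ')
        (acc.1 ++ [rendered_word], starts', acc.2.2 + PySem.Str.len rendered_word + 1))
      (rw, s)
    = (rw ++ l.map (pvPad typed_words),
       (l.map (pvPad typed_words)).foldl
         (fun (acc : List Int × Int) (r : String) => (acc.1 ++ [acc.2], acc.2 + PySem.Str.len r + 1)) s) := by
  induction l generalizing rw s with
  | nil => simp
  | cons p tl ih =>
    simp only [List.foldl_cons, List.map_cons, ih]
    have hp : (let typed_word := if p.1 < (typed_words.length : Int) then PySem.List.pyGetD typed_words p.1 [] else []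
               let extra_len := max ((typed_word.length : Int) - PySem.Str.len p.2) 0
               p.2 ++ String.ofList (List.replicate extra_len.toNat ' ')) = pvPad typed_words p := by
      simp [pvPad, pvExtra]
    simp only [hp]
    simp

-- joining the padded words with single spaces is the model text of the cells
theorem pv_join_model (typed_words : List (List String)) (l : List (Int × String)) :
    PySem.Chars.join [' '] ((l.map (pvPad typed_words)).map String.toList)
    = pvModel (l.map (pvCell typed_words)) := by
  induction l with
  | nil => simp [pvModel, PySem.Chars.join_nil]
  | cons p tl ih =>
    have hpad : (pvPad typed_words p).toList = p.2.toList ++ List.replicate (pvExtra typed_words p) ' ' := by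
      simp [pvPad]
    cases tl with
    | nil =>
      simp only [List.map_cons, List.map_nil, PySem.Chars.join_singleton, pvModel, pvCell,
        List.isEmpty_nil, if_pos, hpad, List.append_nil]
    | cons q tl' =>
      simp only [List.map_cons, PySem.Chars.join_cons_cons] at *
      rw [ih]
      simp [pvModel, pvCell, hpad]

-- the start/offset fold produces the exclusive prefix sums of the cell widths + 1
theorem pv_starts_fold (typed_words : List (List String)) (l : List (Int × String))
    (s0 : List Int) (off : Nat) :
    (l.foldl (fun (acc : List Int × Int) (p : Int × String) =>
        (acc.1 ++ [acc.2], acc.2 + pvWidth typed_words p + 1)) (s0, (off : Int))).1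
    = s0 ++ (pvStarts off (l.map (pvCell typed_words))).map (fun n : Nat => (n : Int)) := by
  induction l generalizing s0 off with
  | nil => simp [pvStarts]
  | cons p tl ih =>
    simp only [List.foldl_cons, List.map_cons, pvStarts]
    rw [pv_width_eq]
    have : (off : Int) + ((p.2.toList.length + pvExtra typed_words p : Nat) : Int) + 1
        = ((off + (pvCell typed_words p).1.length + (pvCell typed_words p).2 + 1 : Nat) : Int) := by
      simp [pvCell]; ring
    rw [this, ih]
    simp [pvCell]

theorem pv_model_length (ws : List (List Char × Nat)) (hne : ws ≠ []) :
    (pvModel ws).length + 1 = (ws.map (fun q => q.1.length + q.2)).sum + ws.length := by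
  induction ws with
  | nil => simp at hne
  | cons q tl ih =>
    obtain ⟨w, e⟩ := q
    by_cases h : tl = []
    · subst h; simp [pvModel]
    · have := ih h
      simp only [pvModel, List.isEmpty_iff, h, if_false, List.map_cons, List.sum_cons,
        List.length_cons, List.length_append, List.length_replicate]
      omega

-- the blit fold writes each word at its start into the all-space canvas, producing the model text
theorem pv_blit (ws : List (List Char × Nat)) (pre : List Char) :
    ((pvStarts pre.length ws).zip (ws.map Prod.fst)).foldl
      (fun (c : List Char) (p : Nat × List Char) => c.take p.1 ++ p.2 ++ c.drop (p.1 + p.2.length))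
      (pre ++ List.replicate (pvModel ws).length ' ')
    = pre ++ pvModel ws := by
  induction ws generalizing pre with
  | nil => simp [pvModel, pvStarts]
  | cons q tl ih =>
    obtain ⟨w, e⟩ := q
    by_cases h : tl = []
    · subst h
      simp only [pvStarts, pvModel, List.isEmpty_nil, if_pos, List.map_cons, List.map_nil,
        List.zip_cons_cons, List.zip_nil_right, List.foldl_cons, List.foldl_nil, List.append_nil]
      rw [List.take_left, List.drop_length_add_append, List.length_append,
        List.length_replicate, List.drop_replicate]
      simp
    · simp only [pvStarts, pvModel, List.isEmpty_iff, h, if_false, List.map_cons,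
        List.zip_cons_cons, List.foldl_cons]
      have hL : (w ++ List.replicate e ' ' ++ ' ' :: pvModel tl).length = w.length + (e + 1 + (pvModel tl).length) := by
        simp; omega
      rw [hL, List.take_left, List.drop_length_add_append, List.drop_replicate,
        Nat.add_sub_cancel_left]
      have key : pre ++ w ++ List.replicate (e + 1 + (pvModel tl).length) ' '
          = (pre ++ w ++ List.replicate e ' ' ++ [' ']) ++ List.replicate (pvModel tl).length ' ' := by
        rw [show e + 1 + (pvModel tl).length = e + ((pvModel tl).length + 1) by omega,
          List.replicate_add, List.replicate_succ]
        simp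
      rw [key, show pre.length + w.length + e + 1 = (pre ++ w ++ List.replicate e ' ' ++ [' ']).length by simp; omega, ih]
      simp

theorem build_rendered_text_py_eq (prompt_words : List String) (typed_words : List (List String)) :
    build_rendered_text_py prompt_words typed_words = build_rendered_text_py_alt prompt_words typed_words := by
  by_cases hpw : prompt_words = []
  · subst hpw
    simp [build_rendered_text_py, build_rendered_text_py_alt, PySem.List.enumerate_nil]
    rfl
  · unfold build_rendered_text_py build_rendered_text_py_alt
    rw [pv_fused typed_words (PySem.List.enumerate prompt_words) [] ([], 0)]
    simp only [hpw, ne_eq, not_false_iff, if_true, List.nil_append]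
    set l := PySem.List.enumerate prompt_words with hl
    set cells := l.map (pvCell typed_words) with hcells
    have hstartB : ((l.map (pvWidth typed_words)).foldl
        (fun (acc : List Int × Int) (wd : Int) => (acc.1 ++ [acc.2], acc.2 + wd + 1)) ([], 0)).1
        = (pvStarts 0 cells).map (fun n : Nat => (n : Int)) := by
      rw [List.foldl_map]
      simpa using pv_starts_fold typed_words l [] 0
    have hstartA : ((l.map (pvPad typed_words)).foldl
        (fun (acc : List Int × Int) (r : String) => (acc.1 ++ [acc.2], acc.2 + PySem.Str.len r + 1)) ([], 0)).1
        = (pvStarts 0 cells).map (fun n : Nat => (n : Int)) := by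
      rw [List.foldl_map]
      have hf : (fun (acc : List Int × Int) (p : Int × String) => (acc.1 ++ [acc.2], acc.2 + PySem.Str.len (pvPad typed_words p) + 1))
          = (fun (acc : List Int × Int) (p : Int × String) => (acc.1 ++ [acc.2], acc.2 + pvWidth typed_words p + 1)) := by
        funext acc p
        rw [pv_len_pad, ← pv_width_eq]
      rw [hf]
      simpa using pv_starts_fold typed_words l [] 0
    have hcne : cells ≠ [] := by
      simp only [hcells, ne_eq, List.map_eq_nil_iff]
      intro h
      have h2 := PySem.List.map_snd_enumerate prompt_words 0
      rw [← hl, h] at h2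
      exact hpw (by simpa using h2.symm)
    have hfst : cells.map Prod.fst = prompt_words.map String.toList := by
      have hc : Prod.fst ∘ pvCell typed_words = fun p : Int × String => p.2.toList := by
        funext p
        simp [pvCell]
      conv_rhs => rw [← PySem.List.map_snd_enumerate prompt_words 0]
      rw [hcells, List.map_map, hc, ← hl, List.map_map]
      rfl
    have hlenc : cells.length = prompt_words.length := by
      simp [hcells, hl, PySem.List.length_enumerate]
    have htot : ((l.map (pvWidth typed_words)).sum + (prompt_words.length : Int) - 1).toNat
        = (pvModel cells).length := by
      have hw : l.map (pvWidth typed_words) = (cells.map (fun q => q.1.length + q.2)).map (fun n : Nat => (n : Int)) := by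
        simp only [hcells, List.map_map]
        apply List.map_congr_left
        intro p _
        simpa [pvCell] using pv_width_eq typed_words p
      have hml := pv_model_length cells hcne
      rw [hw, ← Nat.cast_list_sum]
      omega
    have hblit : ((((pvStarts 0 cells).map (fun n : Nat => (n : Int))).zip prompt_words).foldl
        (fun (c : List Char) (p : Int × String) =>
          c.take p.1.toNat ++ p.2.toList ++ c.drop (p.1.toNat + p.2.toList.length))
        (List.replicate (pvModel cells).length ' ')) = pvModel cells := by
      have hb := pv_blit cells []
      rw [hfst, List.zip_map_right, List.foldl_map] at hb
      simp only [List.nil_append, List.length_nil] at hb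
      rw [List.zip_map_left, List.foldl_map]
      simpa using hb
    rw [hstartA, hstartB, htot, hblit]
    refine Prod.ext ?_ rfl
    · show PySem.Str.join " " (l.map (pvPad typed_words)) = String.ofList (pvModel cells)
      apply String.toList_inj.mp
      rw [PySem.Str.toList_join]
      simpa using pv_join_model typed_words l

-- ===== VERDICT =====
theorem build_rendered_text_py_spec : Claim_equal_build_rendered_text_py := by
  intro pw tw _
  unfold Spec_build_rendered_text_py
  exact build_rendered_text_py_eq pw tw
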